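-- pv_equiv track=rewrite | github.com/calfzhou/captcha-player | captcha/sogou.py | _fix_diplopia
-- ===== SOURCE A (Python) =====
-- def _fix_diplopia(text, max_tries):
--     """https://github.com/tesseract-ocr/tesseract/issues/3477"""
--     ambiguous = 'ckpsvwxyz'
--     remains = []
--
--     prev = None
--     for ch in text:
--         if max_tries > 0 and prev and prev.lower() in ambiguous and prev.lower() == ch.lower() and prev != ch:
--             max_tries -= 1
--             prev = None
--         else:
--             remains.append(ch)
--             prev = ch
--
--     return ''.join(remains)
-- ===== SOURCE B (Python) =====
-- def _fix_diplopia(text, max_tries):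
--     """Budget-driven find-and-splice: repeatedly locate the first adjacent
--     case-differing ambiguous pair in the remaining text, move the kept part
--     (up to and including the pair's first char) into a list of finished
--     chunks, and continue after the pair, until the budget runs out or no
--     pair is left."""
--     ambiguous = 'ckpsvwxyz'
--
--     def find_pair(s):
--         for i in range(len(s) - 1):
--             a, b = s[i], s[i + 1]
--             if a.lower() in ambiguous and a.lower() == b.lower() and a != b:
--                 return i
--         return -1
--
--     done = []
--     rest = text
--     while max_tries > 0:
--         i = find_pair(rest)
--         if i < 0:
--             break
--         done.append(rest[:i + 1])
--         rest = rest[i + 2:]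
--         max_tries -= 1
--     return ''.join(done) + rest
-- ===== Notes on version B (the rewrite author's own statement) =====
-- stated objective: alternative
-- what changed: Replaces A's single streaming pass with a prev/remains state machine by a budget-driven outer loop that repeatedly searches the remaining text for the first adjacent case-differing ambiguous pair, splices the kept prefix onto a chunk list and restarts the search after the pair.
import Mathlib
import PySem

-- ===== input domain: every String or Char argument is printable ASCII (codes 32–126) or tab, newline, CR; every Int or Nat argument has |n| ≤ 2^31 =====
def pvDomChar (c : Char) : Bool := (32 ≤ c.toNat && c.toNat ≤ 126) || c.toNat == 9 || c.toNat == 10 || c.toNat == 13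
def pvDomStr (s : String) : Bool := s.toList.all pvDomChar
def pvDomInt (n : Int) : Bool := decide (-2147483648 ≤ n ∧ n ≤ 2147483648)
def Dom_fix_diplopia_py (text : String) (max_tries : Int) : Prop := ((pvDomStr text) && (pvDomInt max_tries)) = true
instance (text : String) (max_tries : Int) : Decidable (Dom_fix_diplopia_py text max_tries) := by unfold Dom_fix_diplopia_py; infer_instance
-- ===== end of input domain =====

-- B replaces A's single-pass prev/remains state machine by a budget-driven
-- find-and-splice loop (objective: alternative decomposition, same results).


-- ===== PORT A =====
-- A: one pass, state (budget, prev, remains); a doubled case-differing ambiguous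
-- char drops the current char, resets prev and spends one try
def pvAmb : List Char := ['c','k','p','s','v','w','x','y','z']

-- the for-loop's if-condition ('prev and …' → matches on the Option)
def fixCondA (t : Int) (prev : Option Char) (ch : Char) : Bool :=
  decide (t > 0) &&
    (match prev with
      | some p => pvAmb.contains (PySem.Chars.lowerChar p) &&
          (PySem.Chars.lowerChar p == PySem.Chars.lowerChar ch) && (p != ch)
      | none => false)

def fixGoA : List Char → Int → Option Char → List Char → List Char
  | [], _, _, remains => remains
  | ch :: rest, t, prev, remains =>
    if fixCondA t prev ch
    then fixGoA rest (t - 1) none remains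
    else fixGoA rest t (some ch) (remains ++ [ch])

def fix_diplopia_py (text : String) (max_tries : Int) : String :=
  String.ofList (fixGoA text.toList max_tries none [])

-- ===== PORT B =====
-- B: budget-driven loop; each round finds the FIRST adjacent case-differing
-- ambiguous pair in the remaining text, moves the prefix up to and including
-- the pair's first char to the finished chunks, and continues after the pair
def pairC (c1 c2 : Char) : Bool :=
  pvAmb.contains (PySem.Chars.lowerChar c1) &&
    (PySem.Chars.lowerChar c1 == PySem.Chars.lowerChar c2) && (c1 != c2)

-- Source B's find_pair: scan i over range(len(s)-1); here Option Nat instead of -1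
def findPairB (s : List Char) (i : Nat) : Option Nat :=
  if h : i + 1 < s.length then
    if pairC (s[i]'(by omega)) (s[i+1]'h) then some i else findPairB s (i+1)
  else none
termination_by s.length - i

def fixGoB (done rest : List Char) (t : Int) : List Char :=
  if 0 < t then
    match findPairB rest 0 with
    | some i => fixGoB (done ++ rest.take (i+1)) (rest.drop (i+2)) (t-1)
    | none => done ++ rest
  else done ++ rest
termination_by t.toNat
decreasing_by omega

def fix_diplopia_py_alt (text : String) (max_tries : Int) : String :=
  String.ofList (fixGoB [] text.toList max_tries)

-- ===== PRECONDITION & SPEC =====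
def Spec_fix_diplopia_py (text : String) (max_tries : Int) (out : String) : Prop := out = fix_diplopia_py_alt text max_tries
instance (text : String) (max_tries : Int) (out : String) : Decidable (Spec_fix_diplopia_py text max_tries out) := by unfold Spec_fix_diplopia_py; infer_instance

-- ===== CLAIM (what is proved, stated in full; the proofs are below) =====
def Claim_equal_fix_diplopia_py : Prop := ∀ (text : String) (max_tries : Int), Dom_fix_diplopia_py text max_tries → Spec_fix_diplopia_py text max_tries (fix_diplopia_py text max_tries)

-- ===== LEMMAS AND PROOFS =====
theorem fixCondA_none (t : Int) (ch : Char) : fixCondA t none ch = false := by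
  simp [fixCondA]

theorem fixCondA_some (t : Int) (p ch : Char) :
    fixCondA t (some p) ch = (decide (t > 0) && pairC p ch) := rfl

-- with no budget left A appends everything
theorem fixGoA_nonpos : ∀ (l : List Char) (t : Int) (prev : Option Char) (done : List Char),
    t ≤ 0 → fixGoA l t prev done = done ++ l := by
  intro l
  induction l with
  | nil => intro t prev done _; simp [fixGoA]
  | cons ch rest ih =>
    intro t prev done ht
    have hc : fixCondA t prev ch = false := by
      simp [fixCondA, show ¬ (t > 0) by omega]
    rw [fixGoA, hc, if_neg (by simp), ih t (some ch) (done ++ [ch]) ht]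
    simp

-- pair-free remainder (with the previous char in front) is appended verbatim
theorem fixGoA_nopair_prev : ∀ (l : List Char) (t : Int) (p : Char) (done : List Char),
    List.IsChain (fun a b => pairC a b = false) (p :: l) →
    fixGoA l t (some p) done = done ++ l := by
  intro l
  induction l with
  | nil => intro t p done _; simp [fixGoA]
  | cons ch rest ih =>
    intro t p done hch
    rw [List.isChain_cons] at hch
    have hc : fixCondA t (some p) ch = false := by
      rw [fixCondA_some, hch.1 _ rfl]; simp
    rw [fixGoA, hc, if_neg (by simp), ih t ch (done ++ [ch]) hch.2]
    simp

theorem fixGoA_nopair (l : List Char) (t : Int) (done : List Char)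
    (h : List.IsChain (fun a b => pairC a b = false) l) :
    fixGoA l t none done = done ++ l := by
  cases l with
  | nil => simp [fixGoA]
  | cons ch rest =>
    rw [fixGoA, fixCondA_none, if_neg (by simp), fixGoA_nopair_prev rest t ch (done ++ [ch]) h]
    simp

-- walking a pair-free prefix a up to the first pair (c1,c2), with prev = some p
theorem fixGoA_prefix_prev : ∀ (a : List Char) (c1 c2 : Char) (r : List Char) (t : Int)
    (p : Char) (done : List Char), 0 < t →
    List.IsChain (fun x y => pairC x y = false) (p :: (a ++ [c1])) →
    pairC c1 c2 = true →
    fixGoA (a ++ c1 :: c2 :: r) t (some p) done = fixGoA r (t - 1) none (done ++ a ++ [c1]) := by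
  intro a
  induction a with
  | nil =>
    intro c1 c2 r t p done ht hch hp
    rw [List.isChain_cons] at hch
    have h1 : fixCondA t (some p) c1 = false := by
      rw [fixCondA_some, hch.1 _ rfl]; simp
    have h2 : fixCondA t (some c1) c2 = true := by
      rw [fixCondA_some, hp]; simp; omega
    simp only [List.nil_append]
    rw [fixGoA, h1, if_neg (by simp), fixGoA, h2, if_pos rfl]
    simp
  | cons x a' ih =>
    intro c1 c2 r t p done ht hch hp
    rw [show (p :: (x :: a' ++ [c1])) = p :: x :: (a' ++ [c1]) by simp,
      List.isChain_cons] at hch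
    have h1 : fixCondA t (some p) x = false := by
      rw [fixCondA_some, hch.1 _ rfl]; simp
    rw [show ((x :: a') ++ c1 :: c2 :: r) = x :: (a' ++ c1 :: c2 :: r) by simp,
      fixGoA, h1, if_neg (by simp), ih c1 c2 r t x (done ++ [x]) ht hch.2 hp]
    simp

theorem fixGoA_prefix (a : List Char) (c1 c2 : Char) (r : List Char) (t : Int)
    (done : List Char) (ht : 0 < t)
    (hch : List.IsChain (fun x y => pairC x y = false) (a ++ [c1]))
    (hp : pairC c1 c2 = true) :
    fixGoA (a ++ c1 :: c2 :: r) t none done = fixGoA r (t - 1) none (done ++ a ++ [c1]) := by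
  cases a with
  | nil =>
    have h2 : fixCondA t (some c1) c2 = true := by
      rw [fixCondA_some, hp]; simp; omega
    simp only [List.nil_append]
    rw [fixGoA, fixCondA_none, if_neg (by simp), fixGoA, h2, if_pos rfl]
    simp
  | cons x a' =>
    rw [show ((x :: a') ++ c1 :: c2 :: r) = x :: (a' ++ c1 :: c2 :: r) by simp,
      fixGoA, fixCondA_none, if_neg (by simp),
      fixGoA_prefix_prev a' c1 c2 r t x (done ++ [x]) ht (by simpa using hch) hp]
    simp

-- findPairB specifications
theorem findPairB_none_aux (s : List Char) : ∀ (m i : Nat), s.length ≤ i + m →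
    findPairB s i = none →
    ∀ j (hj : j + 1 < s.length), i ≤ j → pairC (s[j]'(by omega)) (s[j+1]'hj) = false := by
  intro m
  induction m with
  | zero => intro i hm _ j hj hij; omega
  | succ m ih =>
    intro i hm hnone j hj hij
    rw [findPairB] at hnone
    by_cases h : i + 1 < s.length
    · rw [dif_pos h] at hnone
      by_cases hp : pairC (s[i]'(by omega)) (s[i+1]'h) = true
      · rw [if_pos hp] at hnone; exact absurd hnone (by simp)
      · rw [if_neg hp] at hnone
        rcases Nat.eq_or_lt_of_le hij with rfl | hlt
        · simpa using hp
        · exact ih (i+1) (by omega) hnone j hj hlt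
    · omega

theorem findPairB_some_aux (s : List Char) : ∀ (m i k : Nat), s.length ≤ i + m →
    findPairB s i = some k →
    i ≤ k ∧ ∃ (hk : k + 1 < s.length), pairC (s[k]'(by omega)) (s[k+1]'hk) = true ∧
      ∀ j (hj : j + 1 < s.length), i ≤ j → j < k → pairC (s[j]'(by omega)) (s[j+1]'hj) = false := by
  intro m
  induction m with
  | zero =>
    intro i k hm hs
    rw [findPairB, dif_neg (by omega)] at hs
    exact absurd hs (by simp)
  | succ m ih =>
    intro i k hm hs
    rw [findPairB] at hs
    by_cases h : i + 1 < s.length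
    · rw [dif_pos h] at hs
      by_cases hp : pairC (s[i]'(by omega)) (s[i+1]'h) = true
      · rw [if_pos hp] at hs
        obtain rfl : i = k := by simpa using hs
        exact ⟨le_refl _, h, hp, fun j hj h1 h2 => by omega⟩
      · rw [if_neg hp] at hs
        obtain ⟨h1, hk, h2, h3⟩ := ih (i+1) k (by omega) hs
        refine ⟨by omega, hk, h2, fun j hj hij hjk => ?_⟩
        rcases Nat.eq_or_lt_of_le hij with rfl | hlt
        · simpa using hp
        · exact h3 j hj hlt hjk
    · rw [dif_neg h] at hs; exact absurd hs (by simp)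

-- main induction: A's streaming pass equals B's find-and-splice loop
theorem fixA_eq_fixB : ∀ (n : Nat) (l : List Char) (t : Int) (done : List Char),
    l.length ≤ n → fixGoA l t none done = fixGoB done l t := by
  intro n
  induction n with
  | zero =>
    intro l t done h
    obtain rfl : l = [] := by cases l <;> simp_all
    rw [fixGoB]
    simp [fixGoA, findPairB]
  | succ n ih =>
    intro l t done h
    rw [fixGoB]
    by_cases ht : 0 < t
    · rw [if_pos ht]
      cases hf : findPairB l 0 with
      | none =>
        have hch : List.IsChain (fun a b => pairC a b = false) l := by
          rw [List.isChain_iff_getElem]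
          intro j hj
          exact findPairB_none_aux l l.length 0 (by omega) hf j (by omega) (by omega)
        exact fixGoA_nopair l t done hch
      | some i =>
        obtain ⟨-, hk, hp, hno⟩ := findPairB_some_aux l l.length 0 i (by omega) hf
        have hdec : l = l.take i ++ l[i] :: l[i+1] :: l.drop (i+2) := by
          conv_lhs => rw [← List.take_append_drop i l]
          congr 1
          rw [List.drop_eq_getElem_cons (by omega), List.drop_eq_getElem_cons (by omega)]
        have htake : l.take (i+1) = l.take i ++ [l[i]] := by
          rw [List.take_add_one]
          simp [List.getElem?_eq_getElem (show i < l.length by omega)]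
        have hchp : List.IsChain (fun x y => pairC x y = false) (l.take i ++ [l[i]]) := by
          rw [← htake, List.isChain_iff_getElem]
          intro j hj
          have hlen : (l.take (i+1)).length = i + 1 := by
            rw [List.length_take]; omega
          have hj' : j + 1 < i + 1 := by omega
          have e1 : (l.take (i+1))[j] = l[j]'(by omega) := List.getElem_take
          have e2 : (l.take (i+1))[j+1] = l[j+1]'(by omega) := List.getElem_take
          rw [e1, e2]
          exact hno j (by omega) (by omega) (by omega)
        have hA : fixGoA l t none done
            = fixGoA (l.drop (i+2)) (t-1) none (done ++ l.take i ++ [l[i]]) := by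
          conv_lhs => rw [hdec]
          exact fixGoA_prefix (l.take i) l[i] l[i+1] (l.drop (i+2)) t done ht hchp hp
        show fixGoA l t none done = fixGoB (done ++ l.take (i+1)) (l.drop (i+2)) (t-1)
        rw [hA, htake, List.append_assoc]
        exact ih (l.drop (i+2)) (t-1) (done ++ (l.take i ++ [l[i]]))
          (by rw [List.length_drop]; omega)
    · rw [if_neg ht]
      exact fixGoA_nonpos l t none done (by omega)

-- ===== VERDICT (by name: the statement is the Claim_ definition above) =====
theorem fix_diplopia_py_spec : Claim_equal_fix_diplopia_py := by
  intro text max_tries _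
  show fix_diplopia_py text max_tries = fix_diplopia_py_alt text max_tries
  unfold fix_diplopia_py fix_diplopia_py_alt
  rw [fixA_eq_fixB text.toList.length text.toList max_tries [] (le_refl _)]
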